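-- pv_equiv track=rewrite | github.com/dzimbeck/Halo | BitMessage/pybmlib/crypt.py | decodeBase
-- ===== SOURCE A (Python) =====
-- def decodeBase(s, alphabet):
--     base = len(alphabet)
--     length = len(s)
--     num = 0
--
--     try:
--         p = length - 1
--         for c in s:
--             num += alphabet.index(c) * (base ** p)
--             p -= 1
--     except:
--         return 0
--     return num
-- ===== SOURCE B (Python) =====
-- def decodeBase(s, alphabet):
--     # Horner's method with a precomputed char -> first-index dict (O(n+m) vs A's O(n*(m+n))).
--     idx = {}
--     for i, c in enumerate(alphabet):
--         if c not in idx: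
--             idx[c] = i
--     base = len(alphabet)
--     num = 0
--     for c in s:
--         j = idx.get(c)
--         if j is None:
--             return 0
--         num = num * base + j
--     return num
-- ===== Notes on version B (the rewrite author's own statement) =====
-- stated objective: faster
-- what changed: Replaces per-character alphabet.index scans and base**p big-integer powers with a single precomputed char->index dict and Horner's rule accumulation.
import Mathlib
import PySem

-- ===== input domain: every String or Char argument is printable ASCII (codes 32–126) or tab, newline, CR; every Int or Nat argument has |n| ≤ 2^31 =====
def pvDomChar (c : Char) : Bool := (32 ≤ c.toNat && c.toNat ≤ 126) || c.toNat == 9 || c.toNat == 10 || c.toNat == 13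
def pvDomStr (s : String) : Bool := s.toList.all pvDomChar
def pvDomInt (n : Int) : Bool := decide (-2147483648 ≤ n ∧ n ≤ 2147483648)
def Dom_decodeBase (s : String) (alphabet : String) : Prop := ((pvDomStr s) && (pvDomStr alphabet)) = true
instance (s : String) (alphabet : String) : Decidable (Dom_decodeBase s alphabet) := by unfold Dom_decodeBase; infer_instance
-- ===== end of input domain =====

-- B replaces A's per-character alphabet.index scan and base**p power by a precomputed
-- char→index dict and Horner's rule (objective: faster, asymptotically).

-- ===== PORT A =====
-- the for-loop of A; `none` models the exception path (alphabet.index raising ValueError).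
-- p ≥ 0 whenever the loop body runs (p starts at len(s)-1 and reaches 0 on the last char),
-- so Python's base ** p is exactly base ^ p.toNat here.
def decodeBaseGo (alpha : List Char) (base : Int) : List Char → Int → Int → Option Int
  | [], _, num => some num
  | c :: rest, p, num =>
    match PySem.List.index? alpha c with
    | none => none
    | some i => decodeBaseGo alpha base rest (p - 1) (num + (i : Int) * base ^ p.toNat)

def decodeBase (s : String) (alphabet : String) : Int :=
  let base : Int := (alphabet.toList.length : Int)
  match decodeBaseGo alphabet.toList base s.toList ((s.toList.length : Int) - 1) 0 with
  | some n => n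
  | none => 0

-- ===== PORT B =====
-- first loop of Source B: build the first-occurrence char -> index dict
def decodeBaseIdx : List Char → Int → PySem.Dict Char Int → PySem.Dict Char Int
  | [], _, d => d
  | c :: rest, i, d => decodeBaseIdx rest (i + 1) (if d.contains c then d else d.insert c i)

-- second loop of Source B: Horner accumulation; `none` models the early `return 0`
def decodeBaseHorner (idx : PySem.Dict Char Int) (base : Int) : List Char → Int → Option Int
  | [], num => some num
  | c :: rest, num =>
    match idx.get? c with
    | none => none
    | some j => decodeBaseHorner idx base rest (num * base + j)

def decodeBase_alt (s : String) (alphabet : String) : Int :=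
  let idx := decodeBaseIdx alphabet.toList 0 PySem.Dict.empty
  let base : Int := (alphabet.toList.length : Int)
  match decodeBaseHorner idx base s.toList 0 with
  | some n => n
  | none => 0

-- ===== PRECONDITION & SPEC =====
def Spec_decodeBase (s : String) (alphabet : String) (out : Int) : Prop := out = decodeBase_alt s alphabet
instance (s : String) (alphabet : String) (out : Int) : Decidable (Spec_decodeBase s alphabet out) := by unfold Spec_decodeBase; infer_instance

-- ===== CLAIM (what is proved, stated in full; the proofs are below) =====
def Claim_equal_decodeBase : Prop := ∀ (s : String) (alphabet : String), Dom_decodeBase s alphabet → Spec_decodeBase s alphabet (decodeBase s alphabet)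

-- ===== LEMMAS AND PROOFS =====

-- common reference value: positional base-N value of cs over alpha (none = some char missing)
def pvVal (alpha : List Char) (base : Int) : List Char → Option Int
  | [] => some 0
  | c :: rest =>
    match PySem.List.index? alpha c, pvVal alpha base rest with
    | some i, some v => some ((i : Int) * base ^ rest.length + v)
    | _, _ => none

lemma decodeBaseIdx_get? (alpha : List Char) (i0 : Int) (d : PySem.Dict Char Int) (c : Char) :
    (decodeBaseIdx alpha i0 d).get? c =
      (match d.get? c with
       | some v => some v
       | none => (PySem.List.index? alpha c).map (fun k => (k : Int) + i0)) := by
  induction alpha generalizing i0 d with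
  | nil => cases h : d.get? c <;> simp [decodeBaseIdx, h, PySem.List.index?]
  | cons a rest ih =>
    simp only [decodeBaseIdx]
    rw [ih]
    by_cases hca : c = a
    · subst hca
      by_cases hc : d.contains c = true
      · rcases Option.isSome_iff_exists.mp
          (by rw [← PySem.Dict.contains_eq_isSome_get? d c]; exact hc) with ⟨v, hv⟩
        simp [hc, hv]
      · have hnone : d.get? c = none := by
          rcases h : d.get? c with _ | v
          · rfl
          · exact absurd (by rw [PySem.Dict.contains_eq_isSome_get? d c, h]; rfl) hc
        rw [PySem.List.index?_cons_self]
        simp [hc, hnone, PySem.Dict.get?_insert_self]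
    · have hd' : (if d.contains a then d else d.insert a i0).get? c = d.get? c := by
        split
        · rfl
        · rw [PySem.Dict.get?_insert d a c i0]; simp [hca]
      rw [hd', PySem.List.index?_cons_of_ne rest (fun h => hca h.symm)]
      rcases h : d.get? c with _ | v
      · rcases hi : PySem.List.index? rest c with _ | k
        · simp
        · simp; ring
      · simp

lemma decodeBaseIdx_get?_zero (alpha : List Char) (c : Char) :
    (decodeBaseIdx alpha 0 PySem.Dict.empty).get? c
      = (PySem.List.index? alpha c).map (fun k => (k : Int)) := by
  rw [decodeBaseIdx_get?]
  simp [PySem.Dict.get?_empty]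

lemma decodeBaseGo_eq (alpha : List Char) (base : Int) (cs : List Char) (num : Int) :
    decodeBaseGo alpha base cs ((cs.length : Int) - 1) num
      = (pvVal alpha base cs).map (fun v => num + v) := by
  induction cs generalizing num with
  | nil => simp [decodeBaseGo, pvVal]
  | cons c rest ih =>
    have hpt : (((c :: rest).length : Int) - 1).toNat = rest.length := by
      simp
    have hp1 : (((c :: rest).length : Int) - 1) - 1 = (rest.length : Int) - 1 := by
      simp
    rcases hi : PySem.List.index? alpha c with _ | i
    · rw [PySem.List.index?_eq_idxOf?] at hi
      simp [decodeBaseGo, pvVal, hi]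
    · simp only [decodeBaseGo, pvVal, hi, hpt, hp1, ih]
      rcases hv : pvVal alpha base rest with _ | v
      · simp
      · simp; ring

lemma decodeBaseHorner_eq (alpha : List Char) (base : Int) (cs : List Char) (num : Int) :
    decodeBaseHorner (decodeBaseIdx alpha 0 PySem.Dict.empty) base cs num
      = (pvVal alpha base cs).map (fun v => num * base ^ cs.length + v) := by
  induction cs generalizing num with
  | nil => simp [decodeBaseHorner, pvVal]
  | cons c rest ih =>
    rcases hi : PySem.List.index? alpha c with _ | i
    · rw [PySem.List.index?_eq_idxOf?] at hi
      simp [decodeBaseHorner, pvVal, decodeBaseIdx_get?_zero, hi]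
    · simp only [decodeBaseHorner, pvVal, decodeBaseIdx_get?_zero, hi, ih]
      rcases hv : pvVal alpha base rest with _ | v
      · simp
      · simp [pow_succ]; ring

-- ===== VERDICT (by name: the statement is the Claim_ definition above) =====
theorem decodeBase_spec : Claim_equal_decodeBase := by
  intro s alphabet _
  unfold Spec_decodeBase decodeBase decodeBase_alt
  dsimp only
  rw [decodeBaseGo_eq, decodeBaseHorner_eq]
  rcases hv : pvVal alphabet.toList (alphabet.toList.length : Int) s.toList with _ | v <;>
    simp
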